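-- pv_equiv track=rewrite | github.com/AngheloAlf/Programacion-CIAC-2019 | intensivos S2/Fase 1/09/Code/russian_product.py | gen_tabla
-- ===== SOURCE A (Python) =====
-- def gen_tabla(producto):
--     tabla = [producto]
--     n1, n2 = producto
--     while n1 > 1:
--         n1 = n1//2
--         n2 = 2*n2
--         tupla = (n1, n2)
--         tabla.append(tupla)
--     return tabla
-- ===== SOURCE B (Python) =====
-- def gen_tabla(producto):
--     n1, n2 = producto
--     count = n1.bit_length() if n1 > 1 else 1
--     return [(n1 // 2 ** i, n2 * 2 ** i) for i in range(count)]
-- ===== Notes on version B (the rewrite author's own statement) =====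
-- stated objective: alternative
-- what changed: B replaces A's while-loop that threads mutable (n1, n2) state with a closed form: the row count is computed directly from n1.bit_length() and every (halved, doubled) row is derived independently from its index i as (n1 // 2**i, n2 * 2**i).
import Mathlib
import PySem

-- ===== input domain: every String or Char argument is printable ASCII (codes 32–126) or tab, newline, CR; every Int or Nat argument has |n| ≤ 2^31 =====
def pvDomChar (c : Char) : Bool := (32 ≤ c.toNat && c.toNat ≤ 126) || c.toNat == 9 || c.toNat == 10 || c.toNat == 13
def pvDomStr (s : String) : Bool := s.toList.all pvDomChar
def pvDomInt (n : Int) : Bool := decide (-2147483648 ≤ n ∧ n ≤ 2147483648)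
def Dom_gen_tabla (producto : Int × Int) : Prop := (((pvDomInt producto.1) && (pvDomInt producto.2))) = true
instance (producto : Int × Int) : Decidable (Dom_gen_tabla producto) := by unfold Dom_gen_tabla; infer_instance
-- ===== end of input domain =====

-- B replaces A's stateful halving/doubling while-loop by a closed-form indexed table
-- (row i = (n1 // 2**i, n2 * 2**i), row count from bit_length); alternative decomposition, same cost.


-- ===== PORT A =====
-- the while-loop: state (n1, n2) and the accumulated table
def gen_tabla_loop (n1 n2 : Int) (tabla : List (Int × Int)) : List (Int × Int) :=
  if _h : n1 > 1 then
    let n1' := PySem.Int.floordiv n1 2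
    let n2' := 2 * n2
    gen_tabla_loop n1' n2' (tabla ++ [(n1', n2')])
  else tabla
termination_by n1.toNat
decreasing_by
  have hfd : Int.fdiv n1 2 = n1 / 2 := by rw [Int.fdiv_eq_ediv]; simp
  simp only [PySem.Int.floordiv, hfd]
  omega

def gen_tabla (producto : Int × Int) : List (Int × Int) :=
  let tabla := [producto]
  let n1 := producto.1
  let n2 := producto.2
  gen_tabla_loop n1 n2 tabla

-- ===== PORT B =====
def gen_tabla_alt (producto : Int × Int) : List (Int × Int) :=
  let n1 := producto.1
  let n2 := producto.2
  let count : Nat := if n1 > 1 then PySem.Int.bitLength n1 else 1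
  (List.range count).map (fun i => (PySem.Int.floordiv n1 ((2:Int) ^ i), n2 * (2:Int) ^ i))

-- ===== PRECONDITION & SPEC =====
def Spec_gen_tabla (producto : Int × Int) (out : List (Int × Int)) : Prop := out = gen_tabla_alt producto
instance (producto : Int × Int) (out : List (Int × Int)) : Decidable (Spec_gen_tabla producto out) := by unfold Spec_gen_tabla; infer_instance

-- ===== CLAIM (what is proved, stated in full; the proofs are below) =====
def Claim_equal_gen_tabla : Prop := ∀ (producto : Int × Int), Dom_gen_tabla producto → Spec_gen_tabla producto (gen_tabla producto)

-- ===== LEMMAS AND PROOFS =====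

-- rows n1 n2 c = the closed-form table of c rows
def pvRows (n1 n2 : Int) (c : Nat) : List (Int × Int) :=
  (List.range c).map (fun i => (PySem.Int.floordiv n1 ((2:Int) ^ i), n2 * (2:Int) ^ i))

def pvCnt (n1 : Int) : Nat := if n1 > 1 then PySem.Int.bitLength n1 else 1

theorem pvRows_succ (n1 n2 : Int) (c : Nat) :
    pvRows n1 n2 (c + 1) =
      (n1, n2) :: pvRows (PySem.Int.floordiv n1 2) (2 * n2) c := by
  have hfun : ∀ i : Nat,
      (PySem.Int.floordiv n1 ((2:Int) ^ (i + 1)), n2 * (2:Int) ^ (i + 1)) =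
        (PySem.Int.floordiv (PySem.Int.floordiv n1 2) ((2:Int) ^ i), 2 * n2 * (2:Int) ^ i) := by
    intro i
    congr 1
    · simp only [PySem.Int.floordiv]
      rw [Int.fdiv_fdiv_eq_fdiv_mul _ (by norm_num) (by positivity)]
      rw [pow_succ, mul_comm ((2:Int) ^ i) 2]
    · ring
  simp only [pvRows, List.range_succ_eq_map, List.map_cons, List.map_map]
  congr 1
  · simp [PySem.Int.floordiv, Int.fdiv_one]
  · exact List.map_congr_left (fun i _ => hfun i)

theorem pvCnt_pos (n1 : Int) : 1 ≤ pvCnt n1 := by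
  unfold pvCnt
  split_ifs with h
  · have h2 := PySem.Int.lt_two_pow_bitLength n1
    by_contra hc
    have h0 : PySem.Int.bitLength n1 = 0 := by omega
    rw [h0] at h2
    simp at h2
    omega
  · omega

theorem pvCnt_half (n1 : Int) (h : n1 > 1) :
    pvCnt (PySem.Int.floordiv n1 2) = pvCnt n1 - 1 := by
  have hrec := PySem.Int.bitLength_of_pos (n := n1) (by omega)
  by_cases h2 : PySem.Int.floordiv n1 2 > 1
  · simp only [pvCnt, if_pos h, if_pos h2]
    omega
  · have hge : 1 ≤ PySem.Int.floordiv n1 2 := by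
      show 1 ≤ Int.fdiv n1 2
      rw [Int.fdiv_eq_ediv]
      simp
      omega
    have heq : PySem.Int.floordiv n1 2 = 1 := by omega
    rw [heq]
    rw [heq] at hrec
    have hp1 : pvCnt 1 = 1 := by decide
    have hcn : pvCnt n1 = PySem.Int.bitLength n1 := by simp [pvCnt, h]
    have h1 : PySem.Int.bitLength 1 = 1 := by decide
    omega

theorem gen_tabla_loop_eq (fuel : Nat) (n1 n2 : Int) (tabla : List (Int × Int))
    (hf : n1.toNat ≤ fuel) :
    gen_tabla_loop n1 n2 tabla =
      tabla ++ pvRows (PySem.Int.floordiv n1 2) (2 * n2) (pvCnt n1 - 1) := by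
  induction fuel generalizing n1 n2 tabla with
  | zero =>
    rw [gen_tabla_loop.eq_def]
    have : ¬ n1 > 1 := by omega
    simp [this, pvCnt, pvRows]
  | succ k ih =>
    rw [gen_tabla_loop.eq_def]
    split_ifs with h
    · have hfd : PySem.Int.floordiv n1 2 = n1.fdiv 2 := rfl
      have hlt : (PySem.Int.floordiv n1 2).toNat ≤ k := by
        rw [hfd]
        have he : Int.fdiv n1 2 = n1 / 2 := by rw [Int.fdiv_eq_ediv]; simp
        rw [he]
        omega
      rw [ih _ _ _ hlt]
      have hc : pvCnt n1 - 1 = (pvCnt (PySem.Int.floordiv n1 2) - 1) + 1 := by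
        have := pvCnt_half n1 h
        have := pvCnt_pos (PySem.Int.floordiv n1 2)
        omega
      rw [hc, pvRows_succ]
      simp
    · have hc : pvCnt n1 = 1 := by simp [pvCnt, h]
      simp [hc, pvRows]

theorem gen_tabla_eq_rows (producto : Int × Int) :
    gen_tabla producto = pvRows producto.1 producto.2 (pvCnt producto.1) := by
  obtain ⟨n1, n2⟩ := producto
  show gen_tabla_loop n1 n2 [(n1, n2)] = _
  rw [gen_tabla_loop_eq n1.toNat n1 n2 _ le_rfl]
  have hc : pvCnt n1 = (pvCnt n1 - 1) + 1 := by have := pvCnt_pos n1; omega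
  rw [hc, pvRows_succ]
  simp

-- ===== VERDICT (by name: the statement is the Claim_ definition above) =====
theorem gen_tabla_spec : Claim_equal_gen_tabla := by
  intro producto _
  show gen_tabla producto = gen_tabla_alt producto
  rw [gen_tabla_eq_rows]
  rfl
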